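-- pv_equiv track=rewrite | github.com/johannesjungwirth/myhems | myhems.py | berechne_kombinationen
-- ===== SOURCE A (Python) =====
-- from itertools import combinations as iter_combinations
--
-- def berechne_kombinationen(relais_leistung):
--     n = len(relais_leistung)
--     kombinationen = {}
--     for r in range(1, n + 1):
--         for combo in iter_combinations(range(n), r):
--             leistung = sum(relais_leistung[i] for i in combo)
--             maske = [i in combo for i in range(n)]
--             if leistung not in kombinationen:
--                 kombinationen[leistung] = maske
--             else:
--                 if sum(maske) < sum(kombinationen[leistung]):
--                     kombinationen[leistung] = maske
--     sortiert = sorted(kombinationen.items())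
--     result = [(0, [False] * n)] + [(w, m) for w, m in sortiert]
--     return result
-- ===== SOURCE B (Python) =====
-- def berechne_kombinationen(relais_leistung):
--     n = len(relais_leistung)
--     # Incremental subset-sum table: achievable sum (over a nonempty subset of
--     # relays) -> index tuple of the best subset (fewest relays, then smallest
--     # ascending index tuple).  One pass over the relays instead of enumerating
--     # every combination of every size.
--     best = {}
--     for i, p in enumerate(relais_leistung):
--         additions = [(s + p, idx + (i,)) for s, idx in best.items()]
--         additions.append((p, (i,)))
--         for s, idx in additions:
--             if s not in best or (len(idx), idx) < (len(best[s]), best[s]):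
--                 best[s] = idx
--     items = sorted((s, [j in idx for j in range(n)]) for s, idx in best.items())
--     return [(0, [False] * n)] + items
-- ===== Notes on version B (the rewrite author's own statement) =====
-- stated objective: faster
-- what changed: Replaces the size-by-size enumeration of all C(n,r) index combinations with an incremental subset-sum dictionary: one pass over the relays extends each stored best entry by the new relay and resolves sum collisions by an explicit (popcount, index-tuple) key comparison; masks are built once at the end.
import Mathlib
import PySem

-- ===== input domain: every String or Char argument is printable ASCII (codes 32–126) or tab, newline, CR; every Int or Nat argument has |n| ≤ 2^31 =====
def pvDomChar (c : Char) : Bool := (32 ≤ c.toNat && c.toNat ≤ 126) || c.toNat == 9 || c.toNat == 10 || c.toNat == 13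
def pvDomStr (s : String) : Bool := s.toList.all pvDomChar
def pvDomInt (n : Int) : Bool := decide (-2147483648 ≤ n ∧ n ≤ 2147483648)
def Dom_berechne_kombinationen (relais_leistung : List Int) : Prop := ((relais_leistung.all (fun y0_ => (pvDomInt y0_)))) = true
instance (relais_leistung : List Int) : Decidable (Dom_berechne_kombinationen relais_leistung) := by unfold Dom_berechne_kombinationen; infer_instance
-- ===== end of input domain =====

-- B replaces A's size-by-size enumeration of every index combination with an incremental
-- subset-sum dictionary (one pass over the relays, explicit (popcount, index-tuple) tie-break);
-- objective: alternative algorithm, same return value.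

-- ===== PORT A =====
-- mask helper: both Pythons build [j in combo for j in range(n)]
def pvMask (n : Nat) (combo : List Int) : List Bool :=
  (PySem.List.pyRange 0 (n : Int) 1).map (fun i => decide (i ∈ combo))

-- the body of A's inner loop (dict update for one combination)
def pvStepA (relais_leistung : List Int) (n : Nat) (d : PySem.Dict Int (List Bool))
    (combo : List Int) : PySem.Dict Int (List Bool) :=
  let leistung := (combo.map (fun i => PySem.List.pyGetD relais_leistung i 0)).sum
  let maske := pvMask n combo
  match d.get? leistung with
  | none => d.insert leistung maske
  | some m0 =>
      if (maske.map (fun b => if b then (1 : Int) else 0)).sum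
          < (m0.map (fun b => if b then (1 : Int) else 0)).sum
      then d.insert leistung maske else d

-- indices produced by combinations(range(n), r) are always in range: pyGetD is exact here.
-- dict keys are unique, so sorted(items) never compares the masks: sorting by the sum is exact.
def berechne_kombinationen (relais_leistung : List Int) : List (Int × List Bool) :=
  let n := relais_leistung.length
  let kombinationen : PySem.Dict Int (List Bool) :=
    (PySem.List.pyRange 1 ((n : Int) + 1) 1).foldl (fun d r =>
      (PySem.List.combinations (PySem.List.pyRange 0 (n : Int) 1) r.toNat).foldl
        (pvStepA relais_leistung n) d) PySem.Dict.empty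
  let sortiert := PySem.List.sorted kombinationen.items (fun p => p.1)
  (0, List.replicate n false) :: sortiert.map (fun p => (p.1, p.2))

-- ===== PORT B =====
-- Python's tuple '<' on int tuples
def pvLexLt : List Int → List Int → Bool
  | _, [] => false
  | [], _ :: _ => true
  | a :: c, b :: d => if a < b then true else if b < a then false else pvLexLt c d

-- Python's (len(c), c) < (len(d), d)
def pvKeyLt (c d : List Int) : Bool :=
  if c.length < d.length then true
  else if d.length < c.length then false
  else pvLexLt c d

-- the body of B's merge loop (one candidate (sum, index tuple) into the table)
def pvStepB (b : PySem.Dict Int (List Int)) (si : Int × List Int) : PySem.Dict Int (List Int) :=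
  match b.get? si.1 with
  | none => b.insert si.1 si.2
  | some idx0 => if pvKeyLt si.2 idx0 then b.insert si.1 si.2 else b

-- dict keys are unique, so sorted(...) never compares the masks: sorting by the sum is exact.
def berechne_kombinationen_alt (relais_leistung : List Int) : List (Int × List Bool) :=
  let n := relais_leistung.length
  let best : PySem.Dict Int (List Int) :=
    (PySem.List.enumerate relais_leistung).foldl (fun best ip =>
      let additions := best.items.map (fun si => (si.1 + ip.2, si.2 ++ [ip.1])) ++ [(ip.2, [ip.1])]
      additions.foldl pvStepB best) PySem.Dict.empty
  let items := PySem.List.sorted (best.items.map (fun si => (si.1, pvMask n si.2))) (fun p => p.1)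
  (0, List.replicate n false) :: items

-- ===== PRECONDITION & SPEC =====
def Spec_berechne_kombinationen (relais_leistung : List Int) (out : List (Int × List Bool)) : Prop := out = berechne_kombinationen_alt relais_leistung
instance (relais_leistung : List Int) (out : List (Int × List Bool)) : Decidable (Spec_berechne_kombinationen relais_leistung out) := by unfold Spec_berechne_kombinationen; infer_instance

-- ===== CLAIM (what is proved, stated in full; the proofs are below) =====
def Claim_equal_berechne_kombinationen : Prop := ∀ (relais_leistung : List Int), Dom_berechne_kombinationen relais_leistung → Spec_berechne_kombinationen relais_leistung (berechne_kombinationen relais_leistung)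

-- ===== LEMMAS AND PROOFS =====

-- proof-side vocabulary ------------------------------------------------------
-- the sum of a candidate index list
def pvSum (R c : List Int) : Int := (c.map (fun i => PySem.List.pyGetD R i 0)).sum
-- range(i) as A's loops see it
def pvRng (i : Nat) : List Int := PySem.List.pyRange 0 (i : Int) 1
-- A's full enumeration of nonempty index combinations, flattened
def pvLL (i : Nat) : List (List Int) :=
  (PySem.List.pyRange 1 ((i : Int) + 1) 1).flatMap
    (fun r => PySem.List.combinations (pvRng i) r.toNat)
-- a nonempty subset of range(i) with sum s
def pvCand (R : List Int) (i : Nat) (s : Int) (c : List Int) : Prop :=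
  c ≠ [] ∧ c.Sublist (pvRng i) ∧ pvSum R c = s
-- the candidate both programs keep for sum s
def pvBest (R : List Int) (i : Nat) (s : Int) : Option (List Int) :=
  ((pvLL i).filter (fun c => pvSum R c == s)).head?
-- c is the (popcount, index-tuple)-minimal candidate for sum s
def pvIsBest (R : List Int) (i : Nat) (s : Int) (c : List Int) : Prop :=
  pvCand R i s c ∧ ∀ d, pvCand R i s d → d = c ∨ pvKeyLt c d = true
-- the running minimum B's merge loop maintains at one key
def pvCombine (cur : Option (List Int)) (idx : List Int) : Option (List Int) :=
  match cur with
  | none => some idx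
  | some j => if pvKeyLt idx j then some idx else some j

-- order facts ---------------------------------------------------------------
theorem pvLexLt_asymm (c d : List Int) (h1 : pvLexLt c d = true) (h2 : pvLexLt d c = true) : False := by
  induction c generalizing d with
  | nil => cases d with
    | nil => simp [pvLexLt] at h1
    | cons b bs => simp [pvLexLt] at h2
  | cons a as ih =>
    cases d with
    | nil => simp [pvLexLt] at h1
    | cons b bs =>
      simp only [pvLexLt] at h1 h2
      split_ifs at h1 h2 with g1 g2 g3 <;> first | omega | exact ih bs h1 h2
theorem pvLexLt_trans (c d e : List Int) (h1 : pvLexLt c d = true) (h2 : pvLexLt d e = true) : pvLexLt c e = true := by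
  induction c generalizing d e with
  | nil =>
    cases e with
    | nil =>
      cases d with
      | nil => exact h1
      | cons b bs => simp [pvLexLt] at h2
    | cons x xs => simp [pvLexLt]
  | cons a as ih =>
    cases d with
    | nil => simp [pvLexLt] at h1
    | cons b bs =>
      cases e with
      | nil => simp [pvLexLt] at h2
      | cons x xs =>
        simp only [pvLexLt] at h1 h2 ⊢
        by_cases g1 : a < b
        · by_cases g2 : b < x
          · have hax : a < x := by omega
            simp [hax]
          · by_cases g3 : x < b
            · rw [if_neg g2, if_pos g3] at h2
              simp at h2
            · have hax : a < x := by omega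
              simp [hax]
        · by_cases g4 : b < a
          · rw [if_neg g1, if_pos g4] at h1
            simp at h1
          · have hab : a = b := by omega
            subst hab
            rw [if_neg g1, if_neg g4] at h1
            by_cases g5 : a < x
            · simp [g5]
            · by_cases g6 : x < a
              · rw [if_neg g5, if_pos g6] at h2
                simp at h2
              · rw [if_neg g5, if_neg g6] at h2 ⊢
                exact ih bs xs h1 h2
theorem pvLexLt_cons_same (a : Int) (c d : List Int) : pvLexLt (a :: c) (a :: d) = pvLexLt c d := by
  simp [pvLexLt]
theorem pvLexLt_append_same (c d : List Int) (x : Int) (hl : c.length = d.length) (h : pvLexLt c d = true) : pvLexLt (c ++ [x]) (d ++ [x]) = true := by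
  induction c generalizing d with
  | nil =>
    cases d with
    | nil => simp [pvLexLt] at h
    | cons b bs => simp at hl
  | cons a as ih =>
    cases d with
    | nil => simp at hl
    | cons b bs =>
      simp only [pvLexLt, List.cons_append] at h ⊢
      by_cases g1 : a < b
      · simp [g1]
      · by_cases g2 : b < a
        · rw [if_neg g1, if_pos g2] at h
          simp at h
        · rw [if_neg g1, if_neg g2] at h ⊢
          exact ih bs (by simpa using hl) h
theorem pvKeyLt_asymm (c d : List Int) (h1 : pvKeyLt c d = true) (h2 : pvKeyLt d c = true) : False := by
  simp only [pvKeyLt] at h1 h2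
  split_ifs at h1 h2 <;> first | omega | exact pvLexLt_asymm c d h1 h2
theorem pvKeyLt_trans (c d e : List Int) (h1 : pvKeyLt c d = true) (h2 : pvKeyLt d e = true) : pvKeyLt c e = true := by
  simp only [pvKeyLt] at h1 h2 ⊢
  split_ifs at h1 h2 ⊢ <;> first | rfl | omega | exact pvLexLt_trans c d e h1 h2
theorem pvKeyLt_append (c d : List Int) (x : Int) (h : pvKeyLt c d = true) : pvKeyLt (c ++ [x]) (d ++ [x]) = true := by
  simp only [pvKeyLt, List.length_append, List.length_cons] at h ⊢
  split_ifs at h ⊢ with g1 g2 g3 g4 <;> first | rfl | omega |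
    exact pvLexLt_append_same c d x (by omega) h
theorem pvKeyLt_length_le (c d : List Int) (h : pvKeyLt c d = true) : c.length ≤ d.length := by
  simp only [pvKeyLt] at h
  split_ifs at h <;> omega
theorem pvKeyLt_of_length_lt (c d : List Int) (h : c.length < d.length) : pvKeyLt c d = true := by
  simp [pvKeyLt, h]
theorem pvKeyLt_of_lex (c d : List Int) (hl : c.length = d.length) (h : pvLexLt c d = true) : pvKeyLt c d = true := by
  simp [pvKeyLt, hl, h]
theorem pvLexLt_total (c d : List Int) : c = d ∨ pvLexLt c d = true ∨ pvLexLt d c = true := by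
  induction c generalizing d with
  | nil =>
    cases d with
    | nil => exact Or.inl rfl
    | cons b bs => exact Or.inr (Or.inl (by simp [pvLexLt]))
  | cons a as ih =>
    cases d with
    | nil => exact Or.inr (Or.inr (by simp [pvLexLt]))
    | cons b bs =>
      by_cases g1 : a < b
      · exact Or.inr (Or.inl (by simp [pvLexLt, g1]))
      · by_cases g2 : b < a
        · exact Or.inr (Or.inr (by simp [pvLexLt, g2]))
        · have hab : a = b := by omega
          subst hab
          rcases ih bs with h | h | h
          · exact Or.inl (by rw [h])
          · exact Or.inr (Or.inl (by rwa [pvLexLt_cons_same]))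
          · exact Or.inr (Or.inr (by rwa [pvLexLt_cons_same]))

theorem pvKeyLt_total (c d : List Int) : c = d ∨ pvKeyLt c d = true ∨ pvKeyLt d c = true := by
  by_cases g1 : c.length < d.length
  · exact Or.inr (Or.inl (pvKeyLt_of_length_lt c d g1))
  · by_cases g2 : d.length < c.length
    · exact Or.inr (Or.inr (pvKeyLt_of_length_lt d c g2))
    · have hl : c.length = d.length := by omega
      rcases pvLexLt_total c d with h | h | h
      · exact Or.inl h
      · exact Or.inr (Or.inl (pvKeyLt_of_lex c d hl h))
      · exact Or.inr (Or.inr (pvKeyLt_of_lex d c hl.symm h))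

-- range / enumeration facts --------------------------------------------------
theorem pvRng_pairwise (a b : Int) : (PySem.List.pyRange a b 1).Pairwise (· < ·) := by
  suffices h : ∀ (k : Nat) (a : Int), (b - a).toNat ≤ k → (PySem.List.pyRange a b 1).Pairwise (· < ·) from
    h (b - a).toNat a le_rfl
  intro k
  induction k with
  | zero =>
    intro a ha
    have hnil : PySem.List.pyRange a b 1 = [] := by
      rw [List.eq_nil_iff_forall_not_mem]
      intro x hx
      rw [PySem.List.mem_pyRange_one] at hx
      omega
    simp [hnil]
  | succ k ih =>
    intro a ha
    by_cases hab : a < b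
    · rw [PySem.List.pyRange_one_cons hab]
      constructor
      · intro x hx
        rw [PySem.List.mem_pyRange_one] at hx
        omega
      · exact ih (a + 1) (by omega)
    · have hnil : PySem.List.pyRange a b 1 = [] := by
        rw [List.eq_nil_iff_forall_not_mem]
        intro x hx
        rw [PySem.List.mem_pyRange_one] at hx
        omega
      simp [hnil]
theorem pvRng_succ (i : Nat) : pvRng (i + 1) = pvRng i ++ [(i : Int)] := by
  unfold pvRng
  have h : ((i + 1 : Nat) : Int) = (i : Int) + 1 := by push_cast; ring
  rw [h, PySem.List.pyRange_one_succ_right (by positivity)]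
theorem pvRng_length (i : Nat) : (pvRng i).length = i := by
  unfold pvRng
  rw [PySem.List.pyRange_zero_natCast]
  simp
theorem pvRng_nodup (i : Nat) : (pvRng i).Nodup := by
  exact (pvRng_pairwise 0 (i : Int)).imp (fun h => ne_of_lt h)
theorem pv_mem_LL (i : Nat) (c : List Int) : c ∈ pvLL i ↔ c ≠ [] ∧ c.Sublist (pvRng i) := by
  unfold pvLL
  simp only [List.mem_flatMap, PySem.List.mem_combinations_iff, PySem.List.mem_pyRange_one]
  constructor
  · rintro ⟨r, ⟨hr1, hr2⟩, hsub, hlen⟩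
    refine ⟨?_, hsub⟩
    intro hnil
    subst hnil
    simp at hlen
    omega
  · rintro ⟨hne, hsub⟩
    refine ⟨(c.length : Int), ⟨?_, ?_⟩, hsub, by simp⟩
    · have : 0 < c.length := List.length_pos_iff.mpr hne
      omega
    · have h1 : c.length ≤ (pvRng i).length := hsub.length_le
      rw [pvRng_length] at h1
      omega
theorem pv_comb_pairwise (xs : List Int) (hx : xs.Pairwise (· < ·)) (r : Nat) :
    (PySem.List.combinations xs r).Pairwise (fun c d => pvLexLt c d = true) := by
  induction xs generalizing r with
  | nil =>
    cases r with
    | zero => simp [PySem.List.combinations_zero]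
    | succ r => simp [PySem.List.combinations_nil_succ]
  | cons x xs ih =>
    cases r with
    | zero => simp [PySem.List.combinations_zero]
    | succ r =>
      rw [PySem.List.combinations_cons_succ]
      rw [List.pairwise_append]
      refine ⟨?_, ih hx.of_cons (r + 1), ?_⟩
      · rw [List.pairwise_map]
        exact (ih hx.of_cons r).imp (fun h => by rwa [pvLexLt_cons_same])
      · intro c' hc' d hd
        rw [List.mem_map] at hc'
        obtain ⟨c, _, rfl⟩ := hc'
        rw [PySem.List.mem_combinations_iff] at hd
        obtain ⟨hdsub, hdlen⟩ := hd
        cases d with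
        | nil => simp at hdlen
        | cons y ys =>
          have hy : y ∈ xs := hdsub.subset (List.mem_cons_self)
          have hxy : x < y := (List.pairwise_cons.mp hx).1 y hy
          simp [pvLexLt, hxy]
theorem pvLL_pairwise (i : Nat) : (pvLL i).Pairwise (fun c d => pvKeyLt c d = true) := by
  unfold pvLL
  rw [List.flatMap_def, List.pairwise_flatten]
  constructor
  · intro l hl
    rw [List.mem_map] at hl
    obtain ⟨r, hr, rfl⟩ := hl
    have hp := pv_comb_pairwise (pvRng i) (pvRng_pairwise 0 (i : Int)) r.toNat
    refine List.Pairwise.imp_of_mem ?_ hp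
    intro c d hc hd hlex
    have hc' := (PySem.List.mem_combinations_iff _ _ _).mp hc
    have hd' := (PySem.List.mem_combinations_iff _ _ _).mp hd
    exact pvKeyLt_of_lex c d (by rw [hc'.2, hd'.2]) hlex
  · rw [List.pairwise_map]
    refine List.Pairwise.imp_of_mem ?_ (pvRng_pairwise 1 ((i : Int) + 1))
    intro r1 r2 h1 h2 hlt c hc d hd
    rw [PySem.List.mem_pyRange_one] at h1 h2
    have hc' := (PySem.List.mem_combinations_iff _ _ _).mp hc
    have hd' := (PySem.List.mem_combinations_iff _ _ _).mp hd
    apply pvKeyLt_of_length_lt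
    rw [hc'.2, hd'.2]
    omega

-- mask facts -----------------------------------------------------------------
theorem pv_filter_mem_eq (c l : List Int) (hnd : l.Nodup) (h : c.Sublist l) :
    l.filter (fun x => decide (x ∈ c)) = c := by
  induction h with
  | slnil => rfl
  | @cons c' l' a h ih =>
    rw [List.nodup_cons] at hnd
    have ha : a ∉ c' := fun hac => hnd.1 (h.subset hac)
    simp only [List.filter_cons]
    rw [if_neg (by simp [ha])]
    exact ih hnd.2
  | @cons₂ c' l' a h ih =>
    rw [List.nodup_cons] at hnd
    simp only [List.filter_cons]
    rw [if_pos (by simp)]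
    congr 1
    have hcg : l'.filter (fun x => decide (x ∈ a :: c')) = l'.filter (fun x => decide (x ∈ c')) :=
      List.filter_congr (fun x hx => by
        have hxa : x ≠ a := fun hh => hnd.1 (hh ▸ hx)
        simp [hxa])
    rw [hcg]
    exact ih hnd.2
theorem pvMask_popcount (n : Nat) (c : List Int) (h : c.Sublist (pvRng n)) :
    ((pvMask n c).map (fun b => if b then (1 : Int) else 0)).sum = (c.length : Int) := by
  have hmask : pvMask n c = (pvRng n).map (fun i => decide (i ∈ c)) := rfl
  rw [hmask, List.map_map]
  have h2 : ((fun b => if b = true then (1 : Int) else 0) ∘ fun i : Int => decide (i ∈ c))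
      = (fun i : Int => if (fun x : Int => decide (x ∈ c)) i = true then (1 : Int) else 0) := rfl
  rw [h2, PySem.List.sum_map_ite_one_zero]
  congr 1
  rw [List.countP_eq_length_filter, pv_filter_mem_eq c (pvRng n) (pvRng_nodup n) h]

-- best-candidate facts -------------------------------------------------------
theorem pvBest_isBest (R : List Int) (i : Nat) (s : Int) (c : List Int)
    (h : pvBest R i s = some c) : pvIsBest R i s c := by
  unfold pvBest at h
  set F := (pvLL i).filter (fun c => pvSum R c == s) with hF
  cases hFe : F with
  | nil => rw [hFe] at h; simp at h
  | cons c0 t =>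
    rw [hFe] at h
    simp only [List.head?_cons, Option.some.injEq] at h
    subst h
    have hpw : F.Pairwise (fun a b => pvKeyLt a b = true) := (pvLL_pairwise i).filter _
    rw [hFe] at hpw
    have hc0 : c0 ∈ F := by rw [hFe]; exact List.mem_cons_self
    have hcand : pvCand R i s c0 := by
      rw [hF, List.mem_filter] at hc0
      obtain ⟨hmem, hbeq⟩ := hc0
      rw [pv_mem_LL] at hmem
      exact ⟨hmem.1, hmem.2, by simpa using hbeq⟩
    refine ⟨hcand, ?_⟩
    intro d hd
    have hdF : d ∈ F := by
      rw [hF, List.mem_filter]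
      exact ⟨(pv_mem_LL i d).mpr ⟨hd.1, hd.2.1⟩, by simp [hd.2.2]⟩
    rw [hFe] at hdF
    rcases List.mem_cons.mp hdF with h | h
    · exact Or.inl h
    · exact Or.inr ((List.pairwise_cons.mp hpw).1 d h)
theorem pvBest_isSome (R : List Int) (i : Nat) (s : Int) (c : List Int)
    (h : pvCand R i s c) : (pvBest R i s).isSome := by
  have hcF : c ∈ (pvLL i).filter (fun c => pvSum R c == s) := by
    rw [List.mem_filter]
    exact ⟨(pv_mem_LL i c).mpr ⟨h.1, h.2.1⟩, by simp [h.2.2]⟩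
  unfold pvBest
  cases hFe : (pvLL i).filter (fun c => pvSum R c == s) with
  | nil => rw [hFe] at hcF; simp at hcF
  | cons a t => simp
theorem pvIsBest_unique (R : List Int) (i : Nat) (s : Int) (c c' : List Int)
    (h1 : pvIsBest R i s c) (h2 : pvIsBest R i s c') : c = c' := by
  rcases h1.2 c' h2.1 with h | hlt1
  · exact h.symm
  · rcases h2.2 c h1.1 with h | hlt2
    · exact h
    · exact (pvKeyLt_asymm c c' hlt1 hlt2).elim
theorem pvBest_of_isBest (R : List Int) (i : Nat) (s : Int) (c : List Int)
    (h : pvIsBest R i s c) : pvBest R i s = some c := by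
  obtain ⟨c'', hc''⟩ := Option.isSome_iff_exists.mp (pvBest_isSome R i s c h.1)
  rw [hc'', pvIsBest_unique R i s c'' c (pvBest_isBest R i s c'' hc'') h]
theorem pvBest_zero (R : List Int) (s : Int) : pvBest R 0 s = none := by
  have h : pvLL 0 = [] := by decide
  unfold pvBest
  rw [h]
  rfl

-- step-equation helpers for A
theorem pvStepA_of_none (R : List Int) (n : Nat) (d : PySem.Dict Int (List Bool)) (c : List Int)
    (h : d.get? (pvSum R c) = none) : pvStepA R n d c = d.insert (pvSum R c) (pvMask n c) := by
  have h' : d.get? ((c.map (fun i => PySem.List.pyGetD R i 0)).sum) = none := h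
  simp only [pvStepA]
  rw [h']
  rfl

theorem pvStepA_of_some (R : List Int) (n : Nat) (d : PySem.Dict Int (List Bool)) (c : List Int)
    (m0 : List Bool) (h : d.get? (pvSum R c) = some m0) :
    pvStepA R n d c =
      if ((pvMask n c).map (fun b => if b then (1 : Int) else 0)).sum
          < (m0.map (fun b => if b then (1 : Int) else 0)).sum
      then d.insert (pvSum R c) (pvMask n c) else d := by
  have h' : d.get? ((c.map (fun i => PySem.List.pyGetD R i 0)).sum) = some m0 := h
  simp only [pvStepA]
  rw [h']
  rfl

-- A-side characterisation ----------------------------------------------------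
theorem pvA_inv (R : List Int) (n : Nat) (M : List (List Int)) : ∀ (pre : List (List Int)) (d : PySem.Dict Int (List Bool)),
    (pre ++ M).Pairwise (fun c d => pvKeyLt c d = true) →
    (∀ c ∈ pre ++ M, c.Sublist (pvRng n)) →
    d.keys.Nodup →
    (∀ s, d.get? s = ((pre.filter (fun c => pvSum R c == s)).head?).map (pvMask n)) →
    (M.foldl (pvStepA R n) d).keys.Nodup ∧
    ∀ s, (M.foldl (pvStepA R n) d).get? s
        = (((pre ++ M).filter (fun c => pvSum R c == s)).head?).map (pvMask n) := by
  induction M with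
  | nil =>
    intro pre d hpw hsub hnd hinv
    rw [List.foldl_nil]
    refine ⟨hnd, fun s => ?_⟩
    rw [List.append_nil]
    exact hinv s
  | cons c M ih =>
    intro pre d hpw hsub hnd hinv
    rw [List.foldl_cons]
    have hmemc : c ∈ pre ++ c :: M := List.mem_append.mpr (Or.inr List.mem_cons_self)
    have hsubc : c.Sublist (pvRng n) := hsub c hmemc
    have hassoc : (pre ++ [c]) ++ M = pre ++ c :: M := by simp
    cases hget : d.get? (pvSum R c) with
    | none =>
      have hstep := pvStepA_of_none R n d c hget
      have hpre0 : pre.filter (fun c' => pvSum R c' == pvSum R c) = [] := by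
        have hq := hinv (pvSum R c)
        rw [hget] at hq
        cases hfe : pre.filter (fun c' => pvSum R c' == pvSum R c) with
        | nil => rfl
        | cons a t => rw [hfe] at hq; simp at hq
      have hinv' : ∀ s, (pvStepA R n d c).get? s
          = (((pre ++ [c]).filter (fun c' => pvSum R c' == s)).head?).map (pvMask n) := by
        intro s
        rw [hstep, PySem.Dict.get?_insert, List.filter_append, List.filter_singleton]
        by_cases hs : s = pvSum R c
        · rw [if_pos hs]
          subst hs
          have hb : (pvSum R c == pvSum R c) = true := by simp
          rw [hpre0, hb, cond_true, List.nil_append, List.head?_cons]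
          rfl
        · have hb : (pvSum R c == s) = false := beq_eq_false_iff_ne.mpr (fun h => hs h.symm)
          rw [if_neg hs, hb, cond_false, List.append_nil]
          exact hinv s
      have hres := ih (pre ++ [c]) (pvStepA R n d c)
        (by rw [hassoc]; exact hpw)
        (by intro x hx; rw [hassoc] at hx; exact hsub x hx)
        (by rw [hstep]; exact PySem.Dict.nodup_keys_insert _ _ _ hnd)
        hinv'
      rw [hassoc] at hres
      exact hres
    | some m0 =>
      have hinv0 := hinv (pvSum R c)
      rw [hget] at hinv0
      cases hfe : pre.filter (fun c' => pvSum R c' == pvSum R c) with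
      | nil => rw [hfe] at hinv0; simp at hinv0
      | cons c0 t =>
        rw [hfe] at hinv0
        simp only [List.head?_cons, Option.map_some] at hinv0
        have hm0 : m0 = pvMask n c0 := by injection hinv0
        have hc0pre : c0 ∈ pre ∧ (pvSum R c0 == pvSum R c) = true :=
          List.mem_filter.mp (by rw [hfe]; exact List.mem_cons_self)
        have hsubc0 : c0.Sublist (pvRng n) := hsub c0 (List.mem_append.mpr (Or.inl hc0pre.1))
        have hkey : pvKeyLt c0 c = true :=
          ((List.pairwise_append.mp hpw).2.2) c0 hc0pre.1 c List.mem_cons_self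
        have hlen : c0.length ≤ c.length := pvKeyLt_length_le _ _ hkey
        have hstep : pvStepA R n d c = d := by
          rw [pvStepA_of_some R n d c m0 hget, hm0, pvMask_popcount n c hsubc,
            pvMask_popcount n c0 hsubc0, if_neg (by omega)]
        have hinv' : ∀ s, (pvStepA R n d c).get? s
            = (((pre ++ [c]).filter (fun c' => pvSum R c' == s)).head?).map (pvMask n) := by
          intro s
          rw [hstep, List.filter_append, List.filter_singleton]
          by_cases hs : pvSum R c = s
          · have hb : (pvSum R c == s) = true := beq_iff_eq.mpr hs
            rw [hb, cond_true]
            subst hs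
            rw [hfe, List.cons_append, List.head?_cons, hget, hm0]
            rfl
          · have hb : (pvSum R c == s) = false := beq_eq_false_iff_ne.mpr hs
            rw [hb, cond_false, List.append_nil]
            exact hinv s
        have hres := ih (pre ++ [c]) (pvStepA R n d c)
          (by rw [hassoc]; exact hpw)
          (by intro x hx; rw [hassoc] at hx; exact hsub x hx)
          (by rw [hstep]; exact hnd)
          hinv'
        rw [hassoc] at hres
        exact hres

theorem pvA_char (R : List Int) :
    ((PySem.List.pyRange 1 ((R.length : Int) + 1) 1).foldl (fun d r =>
      (PySem.List.combinations (PySem.List.pyRange 0 (R.length : Int) 1) r.toNat).foldl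
        (pvStepA R R.length) d) PySem.Dict.empty).keys.Nodup ∧
    ∀ s, ((PySem.List.pyRange 1 ((R.length : Int) + 1) 1).foldl (fun d r =>
      (PySem.List.combinations (PySem.List.pyRange 0 (R.length : Int) 1) r.toNat).foldl
        (pvStepA R R.length) d) PySem.Dict.empty).get? s
      = (pvBest R R.length s).map (pvMask R.length) := by
  have hflat : (pvLL R.length).foldl (pvStepA R R.length) PySem.Dict.empty
      = (PySem.List.pyRange 1 ((R.length : Int) + 1) 1).foldl (fun d r =>
          (PySem.List.combinations (PySem.List.pyRange 0 (R.length : Int) 1) r.toNat).foldl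
            (pvStepA R R.length) d) PySem.Dict.empty := by
    unfold pvLL pvRng
    rw [List.flatMap_def, List.foldl_flatten, List.foldl_map]
  have h := pvA_inv R R.length (pvLL R.length) [] PySem.Dict.empty
    (by simpa using pvLL_pairwise R.length)
    (by intro x hx; rw [List.nil_append] at hx; exact ((pv_mem_LL R.length x).mp hx).2)
    PySem.Dict.nodup_keys_empty
    (by intro s; simp)
  rw [hflat] at h
  refine ⟨h.1, fun s => ?_⟩
  have h2 := h.2 s
  rw [List.nil_append] at h2
  exact h2

-- B-side characterisation ----------------------------------------------------
theorem pvCombine_none_left (x : List Int) : pvCombine none x = some x := rfl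
theorem pvCombine_some_left (j x : List Int) :
    pvCombine (some j) x = if pvKeyLt x j then some x else some j := rfl
theorem pvStepB_of_none (b : PySem.Dict Int (List Int)) (si : Int × List Int)
    (h : b.get? si.1 = none) : pvStepB b si = b.insert si.1 si.2 := by
  unfold pvStepB
  rw [h]
theorem pvStepB_of_some (b : PySem.Dict Int (List Int)) (si : Int × List Int) (idx0 : List Int)
    (h : b.get? si.1 = some idx0) :
    pvStepB b si = if pvKeyLt si.2 idx0 then b.insert si.1 si.2 else b := by
  unfold pvStepB
  rw [h]

theorem pvStepB_nodup (b : PySem.Dict Int (List Int)) (si : Int × List Int)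
    (h : b.keys.Nodup) : (pvStepB b si).keys.Nodup := by
  cases hg : b.get? si.1 with
  | none =>
    rw [pvStepB_of_none b si hg]
    exact PySem.Dict.nodup_keys_insert _ _ _ h
  | some idx0 =>
    rw [pvStepB_of_some b si idx0 hg]
    split_ifs
    · exact PySem.Dict.nodup_keys_insert _ _ _ h
    · exact h

theorem pv_merge_get? (adds : List (Int × List Int)) : ∀ (b : PySem.Dict Int (List Int)) (s : Int),
    (adds.foldl pvStepB b).get? s
      = ((adds.filter (fun si => si.1 == s)).map (fun si => si.2)).foldl pvCombine (b.get? s) := by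
  induction adds with
  | nil => intro b s; simp
  | cons a adds ih =>
    intro b s
    rw [List.foldl_cons, List.filter_cons]
    by_cases hks : a.1 = s
    · subst hks
      rw [if_pos (by simp), List.map_cons, List.foldl_cons, ih]
      congr 1
      cases hg : b.get? a.1 with
      | none =>
        rw [pvStepB_of_none b a hg, pvCombine_none_left, PySem.Dict.get?_insert_self]
      | some idx0 =>
        rw [pvStepB_of_some b a idx0 hg, pvCombine_some_left]
        split_ifs with hlt
        · rw [PySem.Dict.get?_insert_self]
        · exact hg
    · have hsa : ¬ s = a.1 := fun h => hks h.symm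
      rw [if_neg (by simp [hks]), ih]
      congr 1
      cases hg : b.get? a.1 with
      | none =>
        rw [pvStepB_of_none b a hg, PySem.Dict.get?_insert, if_neg hsa]
      | some idx0 =>
        rw [pvStepB_of_some b a idx0 hg]
        split_ifs with hlt
        · rw [PySem.Dict.get?_insert, if_neg hsa]
        · rfl

theorem pvCombine_some (l : List (List Int)) (j : List Int) : (l.foldl pvCombine (some j)).isSome := by
  induction l generalizing j with
  | nil => rfl
  | cons x l ih =>
    rw [List.foldl_cons, pvCombine_some_left]
    split_ifs
    · exact ih x
    · exact ih j
theorem pvCombine_none (l : List (List Int)) (base : Option (List Int))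
    (h : l.foldl pvCombine base = none) : base = none ∧ l = [] := by
  cases l with
  | nil => exact ⟨h, rfl⟩
  | cons x l =>
    exfalso
    rw [List.foldl_cons] at h
    have hsome : ∃ j, pvCombine base x = some j := by
      cases base with
      | none => exact ⟨x, pvCombine_none_left x⟩
      | some j =>
        rw [pvCombine_some_left]
        split_ifs <;> exact ⟨_, rfl⟩
    obtain ⟨j, hj⟩ := hsome
    rw [hj] at h
    have := pvCombine_some l j
    rw [h] at this
    simp at this
theorem pvCombine_out (l : List (List Int)) : ∀ (base : Option (List Int)) (r : List Int),
    l.foldl pvCombine base = some r →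
    (base = some r ∨ r ∈ l) ∧ (∀ j, base = some j → j = r ∨ pvKeyLt r j = true) ∧
    (∀ y ∈ l, y = r ∨ pvKeyLt r y = true) := by
  induction l with
  | nil =>
    intro base r h
    refine ⟨Or.inl h, ?_, by simp⟩
    intro j hj
    rw [hj] at h
    exact Or.inl (by injection h)
  | cons x l ih =>
    intro base r h
    rw [List.foldl_cons] at h
    obtain ⟨hA, hB, hC⟩ := ih (pvCombine base x) r h
    have hx : x = r ∨ pvKeyLt r x = true := by
      cases base with
      | none => exact hB x (pvCombine_none_left x)
      | some j =>
        rw [pvCombine_some_left] at hB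
        by_cases hlt : pvKeyLt x j = true
        · rw [if_pos hlt] at hB
          exact hB x rfl
        · rw [if_neg hlt] at hB
          rcases hB j rfl with hjr | hrj
          · rcases pvKeyLt_total x j with hxj | h1 | h1
            · exact Or.inl (hxj.trans hjr)
            · exact absurd h1 hlt
            · exact Or.inr (hjr ▸ h1)
          · rcases pvKeyLt_total x j with hxj | h1 | h1
            · exact Or.inr (hxj ▸ hrj)
            · exact absurd h1 hlt
            · exact Or.inr (pvKeyLt_trans r j x hrj h1)
    refine ⟨?_, ?_, ?_⟩
    · cases base with
      | none =>
        rw [pvCombine_none_left] at hA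
        rcases hA with h1 | h1
        · exact Or.inr (List.mem_cons.mpr (Or.inl (by injection h1 with hh; exact hh.symm)))
        · exact Or.inr (List.mem_cons.mpr (Or.inr h1))
      | some j =>
        rw [pvCombine_some_left] at hA
        by_cases hlt : pvKeyLt x j = true
        · rw [if_pos hlt] at hA
          rcases hA with h1 | h1
          · exact Or.inr (List.mem_cons.mpr (Or.inl (by injection h1 with hh; exact hh.symm)))
          · exact Or.inr (List.mem_cons.mpr (Or.inr h1))
        · rw [if_neg hlt] at hA
          rcases hA with h1 | h1
          · exact Or.inl h1
          · exact Or.inr (List.mem_cons.mpr (Or.inr h1))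
    · intro j hj
      subst hj
      rw [pvCombine_some_left] at hB
      by_cases hlt : pvKeyLt x j = true
      · rw [if_pos hlt] at hB
        rcases hB x rfl with h1 | h1
        · exact Or.inr (h1 ▸ hlt)
        · exact Or.inr (pvKeyLt_trans r x j h1 hlt)
      · rw [if_neg hlt] at hB
        exact hB j rfl
    · intro y hy
      rcases List.mem_cons.mp hy with rfl | hy'
      · exact hx
      · exact hC y hy'

theorem pv_filter_eq_singleton (l : List Int) (a : Int) (hnd : l.Nodup) :
    l.filter (fun x => x == a) = if a ∈ l then [a] else [] := by
  induction l with
  | nil => simp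
  | cons x l ih =>
    rw [List.nodup_cons] at hnd
    rw [List.filter_cons]
    by_cases hxa : x = a
    · subst hxa
      rw [if_pos (by simp)]
      have hfl : l.filter (fun y => y == x) = [] := by
        rw [List.filter_eq_nil_iff]
        intro y hy
        simp only [beq_iff_eq]
        exact fun h => hnd.1 (h ▸ hy)
      rw [hfl, if_pos List.mem_cons_self]
    · rw [if_neg (by simp [hxa]), ih hnd.2]
      by_cases ha : a ∈ l
      · rw [if_pos ha, if_pos (List.mem_cons.mpr (Or.inr ha))]
      · rw [if_neg ha, if_neg (by
          rw [List.mem_cons]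
          rintro (h | h)
          · exact hxa h.symm
          · exact ha h)]

theorem pvSum_append_k (R : List Int) (c' : List Int) (k : Nat) (hk : k < R.length) :
    pvSum R (c' ++ [(k : Int)]) = pvSum R c' + R[k] := by
  unfold pvSum
  rw [List.map_append, List.sum_append]
  simp only [List.map_cons, List.map_nil, List.sum_cons, List.sum_nil, add_zero,
    PySem.List.pyGetD_natCast]
  rw [List.getD_eq_getElem R 0 hk]

theorem pvCand_mono (R : List Int) (k : Nat) (s : Int) (c : List Int)
    (h : pvCand R k s c) : pvCand R (k + 1) s c :=
  ⟨h.1, h.2.1.trans (by rw [pvRng_succ]; exact List.sublist_append_left _ _), h.2.2⟩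

theorem pvCand_append_k (R : List Int) (k : Nat) (s : Int) (c' : List Int) (hk : k < R.length)
    (h : pvCand R k (s - R[k]) c') : pvCand R (k + 1) s (c' ++ [(k : Int)]) :=
  ⟨by simp, by rw [pvRng_succ]; exact h.2.1.append (List.Sublist.refl _),
    by rw [pvSum_append_k R c' k hk, h.2.2]; ring⟩

theorem pvCand_single_k (R : List Int) (k : Nat) (hk : k < R.length) :
    pvCand R (k + 1) (R[k]) [(k : Int)] := by
  have hs : pvSum R [(k : Int)] = R[k] := by
    have h := pvSum_append_k R [] k hk
    simpa [pvSum] using h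
  refine ⟨by simp, ?_, hs⟩
  rw [pvRng_succ]
  exact (List.nil_sublist (pvRng k)).append (List.Sublist.refl [(k : Int)])

theorem pv_foldB_nodup (adds : List (Int × List Int)) : ∀ (b : PySem.Dict Int (List Int)),
    b.keys.Nodup → (adds.foldl pvStepB b).keys.Nodup := by
  induction adds with
  | nil => intro b h; exact h
  | cons a adds ih =>
    intro b h
    rw [List.foldl_cons]
    exact ih _ (pvStepB_nodup b a h)

theorem pvB_final (R : List Int) (k : Nat) (s : Int) (base : Option (List Int))
    (F : List (List Int))
    (hbase : base = pvBest R k s)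
    (hFcand : ∀ y ∈ F, pvCand R (k + 1) s y)
    (hcover : ∀ d, pvCand R (k + 1) s d →
      ∃ y, (base = some y ∨ y ∈ F) ∧ (d = y ∨ pvKeyLt y d = true)) :
    F.foldl pvCombine base = pvBest R (k + 1) s := by
  cases hres : F.foldl pvCombine base with
  | none =>
    obtain ⟨hb, hf⟩ := pvCombine_none F base hres
    cases hbb : pvBest R (k + 1) s with
    | none => rfl
    | some cb =>
      exfalso
      obtain ⟨y, hy1, _⟩ := hcover cb (pvBest_isBest R (k + 1) s cb hbb).1
      rcases hy1 with h1 | h1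
      · rw [hb] at h1; simp at h1
      · rw [hf] at h1; simp at h1
  | some r =>
    have hout := pvCombine_out F base r hres
    have hrcand : pvCand R (k + 1) s r := by
      rcases hout.1 with h1 | h1
      · rw [hbase] at h1
        exact pvCand_mono R k s r (pvBest_isBest R k s r h1).1
      · exact hFcand r h1
    have hdom : ∀ d, pvCand R (k + 1) s d → d = r ∨ pvKeyLt r d = true := by
      intro d hd
      obtain ⟨y, hy1, hy2⟩ := hcover d hd
      have hry : y = r ∨ pvKeyLt r y = true := by
        rcases hy1 with h1 | h1
        · exact hout.2.1 y h1
        · exact hout.2.2 y h1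
      rcases hy2 with rfl | hyd
      · exact hry
      · rcases hry with rfl | hrylt
        · exact Or.inr hyd
        · exact Or.inr (pvKeyLt_trans r y d hrylt hyd)
    exact (pvBest_of_isBest R (k + 1) s r ⟨hrcand, hdom⟩).symm

-- decomposition of a candidate at level k+1
theorem pvCand_decompose (R : List Int) (k : Nat) (s : Int) (hk : k < R.length) (d : List Int)
    (hd : pvCand R (k + 1) s d) :
    pvCand R k s d ∨ (d = [(k : Int)] ∧ R[k] = s) ∨
      (∃ c', c' ≠ [] ∧ pvCand R k (s - R[k]) c' ∧ d = c' ++ [(k : Int)]) := by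
  obtain ⟨hne, hsb, hsum⟩ := hd
  rw [pvRng_succ, List.sublist_append_iff] at hsb
  obtain ⟨l1, l2, rfl, h1, h2⟩ := hsb
  have h2' : l2 = [] ∨ l2 = [(k : Int)] := by
    cases h2 with
    | cons a h => exact Or.inl (List.sublist_nil.mp h)
    | cons₂ a h => exact Or.inr (by rw [List.sublist_nil.mp h])
  rcases h2' with rfl | rfl
  · left
    exact ⟨by simpa using hne, by simpa using h1, by simpa using hsum⟩
  · by_cases hl1 : l1 = []
    · subst hl1
      right; left
      have hh := pvSum_append_k R [] k hk
      rw [hh] at hsum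
      refine ⟨by simp, ?_⟩
      have h0 : pvSum R [] = 0 := rfl
      rw [h0] at hsum
      omega
    · right; right
      have hh := pvSum_append_k R l1 k hk
      rw [hh] at hsum
      exact ⟨l1, hl1, ⟨hl1, h1, by omega⟩, rfl⟩

theorem pvB_step (R : List Int) (k : Nat) (hk : k < R.length) (b : PySem.Dict Int (List Int))
    (hnd : b.keys.Nodup) (hinv : ∀ s, b.get? s = pvBest R k s) :
    ∀ s, ((b.items.map (fun si => (si.1 + R[k], si.2 ++ [(k : Int)])) ++ [(R[k], [(k : Int)])]).foldl
        pvStepB b).get? s = pvBest R (k + 1) s := by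
  intro s
  rw [pv_merge_get?]
  have hitems := PySem.Dict.items_eq_map_keys b hnd []
  have hF : ((b.items.map (fun si => (si.1 + R[k], si.2 ++ [(k : Int)])) ++
        [(R[k], [(k : Int)])]).filter (fun si => si.1 == s)).map (fun si => si.2)
      = (if (s - R[k]) ∈ b.keys then [b.getD (s - R[k]) [] ++ [(k : Int)]] else []) ++
        (if R[k] = s then [[(k : Int)]] else []) := by
    rw [List.filter_append, List.map_append]
    congr 1
    · rw [hitems, List.map_map, List.filter_map, List.map_map]
      have hfc : b.keys.filter ((fun si => si.1 == s) ∘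
            ((fun si => (si.1 + R[k], si.2 ++ [(k : Int)])) ∘ fun k' => (k', b.getD k' [])))
          = b.keys.filter (fun k' => k' == s - R[k]) := by
        apply List.filter_congr
        intro x _
        simp only [Function.comp_apply]
        by_cases hx : x = s - R[k]
        · subst hx
          have hxx : s - R[k] + R[k] = s := by ring
          rw [hxx]
          simp
        · have h1 : x + R[k] ≠ s := fun h => hx (by omega)
          rw [beq_eq_false_iff_ne.mpr h1, beq_eq_false_iff_ne.mpr hx]
      rw [hfc, pv_filter_eq_singleton _ _ hnd]
      by_cases hmem : (s - R[k]) ∈ b.keys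
      · rw [if_pos hmem, if_pos hmem]
        simp
      · rw [if_neg hmem, if_neg hmem]
        simp
    · rw [List.filter_singleton]
      by_cases hps : R[k] = s
      · have hb : ((R[k] : Int) == s) = true := beq_iff_eq.mpr hps
        rw [hb, cond_true, if_pos hps]
        simp
      · have hb : ((R[k] : Int) == s) = false := beq_eq_false_iff_ne.mpr hps
        rw [hb, cond_false, if_neg hps]
        simp
  by_cases hmem : (s - R[k]) ∈ b.keys
  · -- an extension candidate is present
    have hj0ex : ∃ j0, b.get? (s - R[k]) = some j0 := by
      cases hg : b.get? (s - R[k]) with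
      | none =>
        exact absurd ((PySem.Dict.get?_eq_none_iff_not_mem_keys b (s - R[k])).mp hg) (by
          simpa using hmem)
      | some j => exact ⟨j, rfl⟩
    obtain ⟨j0, hj0⟩ := hj0ex
    have hbj0 : pvBest R k (s - R[k]) = some j0 := (hinv (s - R[k])).symm.trans hj0
    have hgetD : b.getD (s - R[k]) [] = j0 := by
      rw [PySem.Dict.getD_eq_get?_getD, hj0]
      rfl
    have hj0best := pvBest_isBest R k (s - R[k]) j0 hbj0
    have hycand : pvCand R (k + 1) s (j0 ++ [(k : Int)]) :=
      pvCand_append_k R k s j0 hk hj0best.1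
    by_cases hps : R[k] = s
    · rw [hF, if_pos hmem, if_pos hps, hgetD]
      apply pvB_final R k s (b.get? s) _ (hinv s)
      · intro y hy
        simp only [List.mem_append, List.mem_singleton] at hy
        rcases hy with rfl | rfl
        · exact hycand
        · have h := pvCand_single_k R k hk
          rwa [hps] at h
      · intro d hd
        rcases pvCand_decompose R k s hk d hd with h1 | ⟨rfl, _⟩ | ⟨c', _, hc'c, rfl⟩
        · obtain ⟨j, hj⟩ := Option.isSome_iff_exists.mp (pvBest_isSome R k s d h1)
          exact ⟨j, Or.inl (by rw [hinv s, hj]), (pvBest_isBest R k s j hj).2 d h1⟩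
        · exact ⟨[(k : Int)], Or.inr (by simp), Or.inl rfl⟩
        · refine ⟨j0 ++ [(k : Int)], Or.inr (by simp), ?_⟩
          rcases hj0best.2 c' hc'c with h | h
          · exact Or.inl (by rw [h])
          · exact Or.inr (pvKeyLt_append j0 c' (k : Int) h)
    · rw [hF, if_pos hmem, if_neg hps, hgetD, List.append_nil]
      apply pvB_final R k s (b.get? s) _ (hinv s)
      · intro y hy
        simp only [List.mem_singleton] at hy
        subst hy
        exact hycand
      · intro d hd
        rcases pvCand_decompose R k s hk d hd with h1 | ⟨rfl, hps'⟩ | ⟨c', _, hc'c, rfl⟩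
        · obtain ⟨j, hj⟩ := Option.isSome_iff_exists.mp (pvBest_isSome R k s d h1)
          exact ⟨j, Or.inl (by rw [hinv s, hj]), (pvBest_isBest R k s j hj).2 d h1⟩
        · exact absurd hps' hps
        · refine ⟨j0 ++ [(k : Int)], Or.inr (by simp), ?_⟩
          rcases hj0best.2 c' hc'c with h | h
          · exact Or.inl (by rw [h])
          · exact Or.inr (pvKeyLt_append j0 c' (k : Int) h)
  · -- no extension candidate
    have hnoext : ∀ c', pvCand R k (s - R[k]) c' → False := by
      intro c' hc'c
      obtain ⟨j, hj⟩ := Option.isSome_iff_exists.mp (pvBest_isSome R k _ c' hc'c)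
      have hg : b.get? (s - R[k]) = some j := by rw [hinv _]; exact hj
      apply hmem
      by_contra hnm
      have hnone := (PySem.Dict.get?_eq_none_iff_not_mem_keys b (s - R[k])).mpr hnm
      rw [hg] at hnone
      simp at hnone
    by_cases hps : R[k] = s
    · rw [hF, if_neg hmem, if_pos hps, List.nil_append]
      apply pvB_final R k s (b.get? s) _ (hinv s)
      · intro y hy
        simp only [List.mem_singleton] at hy
        subst hy
        have h := pvCand_single_k R k hk
        rwa [hps] at h
      · intro d hd
        rcases pvCand_decompose R k s hk d hd with h1 | ⟨rfl, _⟩ | ⟨c', _, hc'c, rfl⟩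
        · obtain ⟨j, hj⟩ := Option.isSome_iff_exists.mp (pvBest_isSome R k s d h1)
          exact ⟨j, Or.inl (by rw [hinv s, hj]), (pvBest_isBest R k s j hj).2 d h1⟩
        · exact ⟨[(k : Int)], Or.inr (by simp), Or.inl rfl⟩
        · exact (hnoext c' hc'c).elim
    · rw [hF, if_neg hmem, if_neg hps, List.nil_append]
      apply pvB_final R k s (b.get? s) _ (hinv s)
      · intro y hy
        simp at hy
      · intro d hd
        rcases pvCand_decompose R k s hk d hd with h1 | ⟨rfl, hps'⟩ | ⟨c', _, hc'c, rfl⟩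
        · obtain ⟨j, hj⟩ := Option.isSome_iff_exists.mp (pvBest_isSome R k s d h1)
          exact ⟨j, Or.inl (by rw [hinv s, hj]), (pvBest_isBest R k s j hj).2 d h1⟩
        · exact absurd hps' hps
        · exact (hnoext c' hc'c).elim

theorem pvB_char (R : List Int) :
    ((PySem.List.enumerate R).foldl (fun best ip =>
      (best.items.map (fun si => (si.1 + ip.2, si.2 ++ [ip.1])) ++ [(ip.2, [ip.1])]).foldl
        pvStepB best) PySem.Dict.empty).keys.Nodup ∧
    ∀ s, ((PySem.List.enumerate R).foldl (fun best ip =>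
      (best.items.map (fun si => (si.1 + ip.2, si.2 ++ [ip.1])) ++ [(ip.2, [ip.1])]).foldl
        pvStepB best) PySem.Dict.empty).get? s = pvBest R R.length s := by
  have hmain : ∀ k, k ≤ R.length →
      (((PySem.List.enumerate R).take k).foldl (fun best ip =>
        (best.items.map (fun si => (si.1 + ip.2, si.2 ++ [ip.1])) ++ [(ip.2, [ip.1])]).foldl
          pvStepB best) PySem.Dict.empty).keys.Nodup ∧
      ∀ s, (((PySem.List.enumerate R).take k).foldl (fun best ip =>
        (best.items.map (fun si => (si.1 + ip.2, si.2 ++ [ip.1])) ++ [(ip.2, [ip.1])]).foldl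
          pvStepB best) PySem.Dict.empty).get? s = pvBest R k s := by
    intro k
    induction k with
    | zero =>
      intro _
      rw [List.take_zero, List.foldl_nil]
      exact ⟨PySem.Dict.nodup_keys_empty, fun s => by rw [PySem.Dict.get?_empty, pvBest_zero]⟩
    | succ k ih =>
      intro hk1
      have hk : k < R.length := by omega
      obtain ⟨hnd, hinv⟩ := ih (by omega)
      have hklen : k < (PySem.List.enumerate R).length := by
        rw [PySem.List.length_enumerate]; exact hk
      have htake : (PySem.List.enumerate R).take (k + 1)
          = (PySem.List.enumerate R).take k ++ [((k : Int), R[k])] := by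
        rw [List.take_add_one, List.getElem?_eq_getElem hklen]
        have he := PySem.List.getElem_enumerate R 0 k hklen
        rw [he]
        simp
      rw [htake, List.foldl_append, List.foldl_cons, List.foldl_nil]
      constructor
      · exact pv_foldB_nodup _ _ hnd
      · exact pvB_step R k hk _ hnd hinv
  have h := hmain R.length le_rfl
  rwa [List.take_of_length_le (by rw [PySem.List.length_enumerate])] at h

-- final assembly -------------------------------------------------------------
theorem pv_pairwise_lt_of_le_nodup (l : List (Int × List Bool))
    (h1 : l.Pairwise (fun a b => a.1 ≤ b.1)) (h2 : (l.map Prod.fst).Nodup) :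
    l.Pairwise (fun a b => a.1 < b.1) := by
  have h2' : l.Pairwise (fun a b => a.1 ≠ b.1) := List.pairwise_map.mp h2
  exact (h1.and h2').imp (fun h => lt_of_le_of_ne h.1 h.2)

theorem pv_sorted_items_eq (R : List Int)
    (dA : PySem.Dict Int (List Bool)) (dB : PySem.Dict Int (List Int))
    (hndA : dA.keys.Nodup) (hndB : dB.keys.Nodup)
    (hinvA : ∀ s, dA.get? s = (pvBest R R.length s).map (pvMask R.length))
    (hinvB : ∀ s, dB.get? s = pvBest R R.length s) :
    (PySem.List.sorted dA.items (fun p => p.1)).map (fun p => (p.1, p.2))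
      = PySem.List.sorted (dB.items.map (fun si => (si.1, pvMask R.length si.2)))
          (fun p => p.1) := by
  have hid : (PySem.List.sorted dA.items (fun p => p.1)).map (fun p => (p.1, p.2))
      = PySem.List.sorted dA.items (fun p => p.1) := by simp
  rw [hid]
  set itemsB := dB.items.map (fun si => (si.1, pvMask R.length si.2)) with hitemsB
  have hmemA : ∀ (s : Int) (v : List Bool), ((s, v) ∈ dA.items)
      ↔ (pvBest R R.length s).map (pvMask R.length) = some v := by
    intro s v
    rw [← PySem.Dict.get?_eq_some_iff_mem_items dA s v hndA, hinvA s]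
  have hmemB : ∀ (s : Int) (v : List Bool), ((s, v) ∈ itemsB)
      ↔ (pvBest R R.length s).map (pvMask R.length) = some v := by
    intro s v
    rw [hitemsB]
    constructor
    · intro hp
      rw [List.mem_map] at hp
      obtain ⟨si, hsi, heq⟩ := hp
      injection heq with h1 h2
      have hg : dB.get? si.1 = some si.2 :=
        PySem.Dict.get?_of_mem_items dB hsi hndB
      have hb : pvBest R R.length si.1 = some si.2 := (hinvB si.1).symm.trans hg
      rw [← h1, hb, ← h2]
      rfl
    · intro hp
      cases hbv : pvBest R R.length s with
      | none => rw [hbv] at hp; simp at hp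
      | some j =>
        rw [hbv] at hp
        have hv : pvMask R.length j = v := by
          simpa using hp
        have hg : dB.get? s = some j := (hinvB s).trans hbv
        rw [List.mem_map]
        exact ⟨(s, j), PySem.Dict.mem_items_of_get?_eq_some dB hg, by rw [hv]⟩
  have hmemEq : ∀ p : Int × List Bool, p ∈ dA.items ↔ p ∈ itemsB := by
    intro p
    obtain ⟨s, v⟩ := p
    rw [hmemA s v, hmemB s v]
  have hkA : dA.items.map Prod.fst = dA.keys := rfl
  have hkB : itemsB.map Prod.fst = dB.keys := by
    rw [hitemsB, List.map_map]
    rfl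
  have hndAitems : dA.items.Nodup := by
    have h : (dA.items.map Prod.fst).Nodup := by rw [hkA]; exact hndA
    exact h.of_map
  have hndBitems : itemsB.Nodup := by
    have h : (itemsB.map Prod.fst).Nodup := by rw [hkB]; exact hndB
    exact h.of_map
  have hperm : dA.items.Perm itemsB := (List.perm_ext_iff_of_nodup hndAitems hndBitems).mpr hmemEq
  have hSperm : (PySem.List.sorted dA.items (fun p => p.1)).Perm itemsB :=
    (PySem.List.sorted_perm dA.items (fun p => p.1) false).trans hperm
  have hfstnodupS : ((PySem.List.sorted dA.items (fun p => p.1)).map Prod.fst).Nodup := by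
    have hp2 := (PySem.List.sorted_perm dA.items (fun p => p.1) false).map Prod.fst
    rw [hp2.nodup_iff, hkA]
    exact hndA
  have hlt := pv_pairwise_lt_of_le_nodup _
    (PySem.List.sorted_pairwise dA.items (fun p => p.1)) hfstnodupS
  exact (PySem.List.sorted_eq_of_perm_of_pairwise_lt itemsB
    (PySem.List.sorted dA.items (fun p => p.1)) (fun p => p.1) hSperm hlt).symm

-- ===== VERDICT (by name: the statement is the Claim_ definition above) =====
theorem berechne_kombinationen_spec : Claim_equal_berechne_kombinationen := by
  intro R _
  unfold Spec_berechne_kombinationen berechne_kombinationen berechne_kombinationen_alt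
  dsimp only
  obtain ⟨hndA, hinvA⟩ := pvA_char R
  obtain ⟨hndB, hinvB⟩ := pvB_char R
  exact congrArg (fun t => (0, List.replicate R.length false) :: t)
    (pv_sorted_items_eq R _ _ hndA hndB hinvA hinvB)
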